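-- pv_equiv track=rewrite | github.com/Gwellir/gb_py_algo | lesson5/task2.py | make_sum_table
-- ===== SOURCE A (Python) =====
-- from collections import deque, defaultdict, Counter
--
-- def make_sum_table(digit_str):
--     spam_dq = deque(digit_str)
--     sum_table = defaultdict(dict)
--     for d1 in digit_str:
--         sub_dict = {}
--         for d2 in digit_str:
--             sub_dict[d2] = spam_dq.popleft()
--             spam_dq.append(sub_dict[d2])
--         spam_dq.append(spam_dq.popleft())  # сдвиг очереди между строками
--         sum_table[d1] = sub_dict
--
--     return sum_table
-- ===== SOURCE B (Python) =====
-- def make_sum_table(digit_str):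
--     n = len(digit_str)
--     last = {}  # distinct chars in first-occurrence order -> index of their last occurrence
--     for i, d in enumerate(digit_str):
--         last[d] = i
--     return {d1: {d2: digit_str[(i + j) % n] for d2, j in last.items()}
--             for d1, i in last.items()}
-- ===== Notes on version B (the rewrite author's own statement) =====
-- stated objective: faster
-- what changed: Replaced the n^2-step deque rotation simulation by the closed form s[(i+j) % n] evaluated only over the U distinct characters (i, j = last occurrence indices), exploiting that popping and re-appending rotates the deque by one and duplicate dict keys keep only their last row/column.
import Mathlib
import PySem

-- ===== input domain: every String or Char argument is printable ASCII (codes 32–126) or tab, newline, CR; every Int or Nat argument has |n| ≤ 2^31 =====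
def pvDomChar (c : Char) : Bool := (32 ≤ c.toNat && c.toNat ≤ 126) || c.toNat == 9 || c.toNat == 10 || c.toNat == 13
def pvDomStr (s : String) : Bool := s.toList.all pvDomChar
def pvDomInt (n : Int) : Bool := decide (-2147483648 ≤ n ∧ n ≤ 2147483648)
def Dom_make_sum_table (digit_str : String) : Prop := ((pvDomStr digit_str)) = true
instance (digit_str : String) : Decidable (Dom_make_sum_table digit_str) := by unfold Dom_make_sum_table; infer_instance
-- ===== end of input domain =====

-- B replaces A's O(n^2) deque-rotation simulation by the closed form s[(i+j) % n] over the
-- distinct characters only (i, j = last-occurrence indices); measured faster on large inputs.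

-- ===== PORT A =====
-- literal port of A: the deque is a List Char (popleft = headD/tail, append = ++ [·]);
-- the deque always has length n when popped and the loops only run when n > 0,
-- so the ' ' default of headD is never used.
def make_sum_table (digit_str : String) : List (String × List (String × String)) :=
  let l := digit_str.toList
  let fin := l.foldl (fun (st : List Char × PySem.Dict String (PySem.Dict String String)) d1 =>
      let inner := l.foldl (fun (st2 : List Char × PySem.Dict String String) d2 =>
          let c := st2.1.headD ' '
          (st2.1.tail ++ [c], st2.2.insert (String.ofList [d2]) (String.ofList [c])))
        (st.1, PySem.Dict.empty)
      (inner.1.tail ++ [inner.1.headD ' '], st.2.insert (String.ofList [d1]) inner.2))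
    (l, PySem.Dict.empty)
  fin.2.items.map (fun p => (p.1, p.2.items))

-- ===== PORT B =====
-- literal port of B (Source B): `last` maps each distinct character (first-occurrence order) to the
-- index of its last occurrence; digit_str[(i+j) % n] is pyGetD/Int.mod (the index is always in range).
def make_sum_table_alt (digit_str : String) : List (String × List (String × String)) :=
  let l := digit_str.toList
  let n : Int := l.length
  let last := (PySem.List.enumerate l 0).foldl
      (fun (d : PySem.Dict String Int) p => d.insert (String.ofList [p.2]) p.1) PySem.Dict.empty
  last.items.map (fun p1 =>
    (p1.1, last.items.map (fun p2 =>
      (p2.1, String.ofList [PySem.List.pyGetD l (PySem.Int.mod (p1.2 + p2.2) n) ' ']))))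

-- ===== PRECONDITION & SPEC =====
def Spec_make_sum_table (digit_str : String) (out : List (String × List (String × String))) : Prop := out = make_sum_table_alt digit_str
instance (digit_str : String) (out : List (String × List (String × String))) : Decidable (Spec_make_sum_table digit_str out) := by unfold Spec_make_sum_table; infer_instance

-- ===== CLAIM (what is proved, stated in full; the proofs are below) =====
def Claim_equal_make_sum_table : Prop := ∀ (digit_str : String), Dom_make_sum_table digit_str → Spec_make_sum_table digit_str (make_sum_table digit_str)

-- ===== LEMMAS AND PROOFS =====

def rowIns (l : List Char) (k : Nat) (sub : PySem.Dict String String) : List Char → PySem.Dict String String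
  | [] => sub
  | c :: ds => rowIns l (k+1) (sub.insert (String.ofList [c]) (String.ofList [l.getD (k % l.length) ' '])) ds
def outIns (l : List Char) (k : Nat) (t : PySem.Dict String (PySem.Dict String String)) : List Char → PySem.Dict String (PySem.Dict String String)
  | [] => t
  | c :: ds => outIns l (k + l.length + 1) (t.insert (String.ofList [c]) (rowIns l k PySem.Dict.empty l)) ds
def lastIns (k : Int) (d : PySem.Dict String Int) : List Char → PySem.Dict String Int
  | [] => d
  | c :: ds => lastIns (k+1) (d.insert (String.ofList [c]) k) ds
def lastIdx : List Char → Char → Option Nat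
  | [], _ => none
  | d :: ds, c => match lastIdx ds c with
      | some j => some (j+1)
      | none => if d = c then some 0 else none

theorem rotate_step (dq : List Char) (h : dq ≠ []) : dq.tail ++ [dq.headD ' '] = dq.rotate 1 := by
  cases dq with
  | nil => simp at h
  | cons a t => simp [List.rotate_cons_succ]

theorem headD_rotate (l : List Char) (h : l ≠ []) (k : Nat) :
    (l.rotate k).headD ' ' = l.getD (k % l.length) ' ' := by
  have hn : 0 < l.length := List.length_pos_iff.mpr h
  have hr : 0 < (l.rotate k).length := by simpa using hn
  rw [List.getD_eq_getElem _ _ (Nat.mod_lt _ hn)]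
  rw [show (l.rotate k).headD ' ' = (l.rotate k).getD 0 ' ' from ?_]
  · rw [List.getD_eq_getElem _ _ hr]
    simp [List.getElem_rotate]
  · cases hh : l.rotate k with
    | nil => rw [hh] at hr; simp at hr
    | cons a t => simp

theorem rotate_ne_nil (l : List Char) (h : l ≠ []) (k : Nat) : l.rotate k ≠ [] := by
  intro hc
  have := congrArg List.length hc
  simp at this
  exact h this

theorem innerFold_eq (l : List Char) (h : l ≠ []) :
    ∀ (ds : List Char) (k : Nat) (sub : PySem.Dict String String),
    ds.foldl (fun (st2 : List Char × PySem.Dict String String) d2 =>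
        let c := st2.1.headD ' '
        (st2.1.tail ++ [c], st2.2.insert (String.ofList [d2]) (String.ofList [c])))
      (l.rotate k, sub)
    = (l.rotate (k + ds.length), rowIns l k sub ds) := by
  intro ds
  induction ds with
  | nil => intro k sub; simp [rowIns]
  | cons c ds ih =>
    intro k sub
    simp only [List.foldl_cons]
    rw [show ((l.rotate k).tail ++ [(l.rotate k).headD ' '], _) = ((l.rotate (k+1) : List Char), sub.insert (String.ofList [c]) (String.ofList [l.getD (k % l.length) ' '])) from ?_]
    · rw [ih]
      have harith : k + 1 + ds.length = k + (ds.length + 1) := by omega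
      simp only [rowIns, List.length_cons, harith]
    · rw [rotate_step _ (rotate_ne_nil l h k), List.rotate_rotate, headD_rotate l h k]

theorem outerFold_eq (l : List Char) (h : l ≠ []) :
    ∀ (ds : List Char) (k : Nat) (t : PySem.Dict String (PySem.Dict String String)),
    ds.foldl (fun (st : List Char × PySem.Dict String (PySem.Dict String String)) d1 =>
      let inner := l.foldl (fun (st2 : List Char × PySem.Dict String String) d2 =>
          let c := st2.1.headD ' '
          (st2.1.tail ++ [c], st2.2.insert (String.ofList [d2]) (String.ofList [c])))
        (st.1, PySem.Dict.empty)
      (inner.1.tail ++ [inner.1.headD ' '], st.2.insert (String.ofList [d1]) inner.2))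
      (l.rotate k, t)
    = (l.rotate (k + ds.length * (l.length + 1)), outIns l k t ds) := by
  intro ds
  induction ds with
  | nil => intro k t; simp [outIns]
  | cons c ds ih =>
    intro k t
    simp only [List.foldl_cons]
    rw [innerFold_eq l h l k PySem.Dict.empty]
    rw [show ((l.rotate (k + l.length)).tail ++ [(l.rotate (k + l.length)).headD ' '] : List Char) = l.rotate (k + l.length + 1) from ?_]
    · rw [ih]
      have harith : k + l.length + 1 + ds.length * (l.length + 1) = k + (ds.length + 1) * (l.length + 1) := by ring
      simp only [outIns, List.length_cons, harith]
    · rw [rotate_step _ (rotate_ne_nil l h _), List.rotate_rotate]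

theorem lastFold_eq :
    ∀ (ds : List Char) (k : Int) (d : PySem.Dict String Int),
    (PySem.List.enumerate ds k).foldl
      (fun (d : PySem.Dict String Int) p => d.insert (String.ofList [p.2]) p.1) d
    = lastIns k d ds := by
  intro ds
  induction ds with
  | nil => intro k d; simp [lastIns, PySem.List.enumerate_nil]
  | cons c ds ih =>
    intro k d
    rw [PySem.List.enumerate_cons]
    simp only [List.foldl_cons]
    rw [ih]
    rfl

theorem rowIns_snoc (l : List Char) (ds : List Char) (c : Char) :
    ∀ (k : Nat) (sub : PySem.Dict String String),
    rowIns l k sub (ds ++ [c])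
    = (rowIns l k sub ds).insert (String.ofList [c]) (String.ofList [l.getD ((k + ds.length) % l.length) ' ']) := by
  induction ds with
  | nil => intro k sub; simp [rowIns]
  | cons d ds ih =>
    intro k sub
    simp only [List.cons_append, rowIns]
    rw [ih]
    have : k + 1 + ds.length = k + (ds.length + 1) := by omega
    simp [this]

theorem outIns_snoc (l : List Char) (ds : List Char) (c : Char) :
    ∀ (k : Nat) (t : PySem.Dict String (PySem.Dict String String)),
    outIns l k t (ds ++ [c])
    = (outIns l k t ds).insert (String.ofList [c]) (rowIns l (k + ds.length * (l.length + 1)) PySem.Dict.empty l) := by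
  induction ds with
  | nil => intro k t; simp [outIns]
  | cons d ds ih =>
    intro k t
    simp only [List.cons_append, outIns]
    rw [ih]
    have : k + l.length + 1 + ds.length * (l.length + 1) = k + (ds.length + 1) * (l.length + 1) := by ring
    simp [this]

theorem lastIns_snoc (ds : List Char) (c : Char) :
    ∀ (k : Int) (d : PySem.Dict String Int),
    lastIns k d (ds ++ [c]) = (lastIns k d ds).insert (String.ofList [c]) (k + ds.length) := by
  induction ds with
  | nil => intro k d; simp [lastIns]
  | cons d' ds ih =>
    intro k d
    simp only [List.cons_append, lastIns]
    rw [ih]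
    have : k + 1 + (ds.length : Int) = k + ((ds.length : Int) + 1) := by ring
    simp [this]

theorem lastIdx_snoc (ds : List Char) (c' c : Char) :
    lastIdx (ds ++ [c']) c = if c' = c then some ds.length else lastIdx ds c := by
  induction ds with
  | nil => simp [lastIdx]
  | cons d ds ih =>
    simp only [List.cons_append, lastIdx, ih]
    by_cases h : c' = c <;> simp [h]

theorem ofList_single_inj (c c' : Char) : String.ofList [c'] = String.ofList [c] ↔ c' = c := by
  constructor
  · intro h
    have := congrArg String.toList h
    simpa using this
  · rintro rfl; rfl

theorem lastIdx_isSome (ds : List Char) (c : Char) (h : c ∈ ds) : (lastIdx ds c).isSome := by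
  induction ds with
  | nil => simp at h
  | cons d ds ih =>
    simp only [lastIdx]
    cases hl : lastIdx ds c with
    | some j => simp
    | none =>
      rcases List.mem_cons.mp h with rfl | hm
      · simp
      · have := ih hm; rw [hl] at this; simp at this

theorem keys_insert_add {κ ν : Type} [BEq κ] [LawfulBEq κ] (d : PySem.Dict κ ν) (k : κ) (v : ν) :
    (d.insert k v).keys = PySem.Set.add d.keys k := by
  by_cases hc : d.contains k = true
  · rw [PySem.Dict.keys_insert_of_contains _ _ hc,
      PySem.Set.add_of_mem ((PySem.Dict.contains_iff_mem_keys _ _).mp hc)]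
  · have hc' : d.contains k = false := by simpa using hc
    rw [PySem.Dict.keys_insert_of_not_contains _ _ hc',
      PySem.Set.add_of_not_mem]
    intro hm
    exact hc ((PySem.Dict.contains_iff_mem_keys _ _).mpr hm)

theorem rowIns_keys (l : List Char) (ds : List Char) :
    ∀ (k : Nat), (rowIns l k PySem.Dict.empty ds).keys = PySem.Set.ofList (ds.map (fun c => String.ofList [c])) := by
  induction ds using List.reverseRecOn with
  | nil => intro k; simp [rowIns, PySem.Dict.keys_empty, PySem.Set.ofList_nil]
  | append_singleton ds c ih =>
    intro k
    rw [rowIns_snoc, keys_insert_add, ih k, List.map_append, List.map_cons, List.map_nil,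
      PySem.Set.ofList_append_singleton]

theorem rowIns_keys_nodup (l : List Char) (ds : List Char) (k : Nat) :
    (rowIns l k PySem.Dict.empty ds).keys.Nodup := by
  rw [rowIns_keys]; exact PySem.Set.nodup_ofList _

theorem outIns_keys (l : List Char) (ds : List Char) :
    ∀ (k : Nat), (outIns l k PySem.Dict.empty ds).keys = PySem.Set.ofList (ds.map (fun c => String.ofList [c])) := by
  induction ds using List.reverseRecOn with
  | nil => intro k; simp [outIns, PySem.Dict.keys_empty, PySem.Set.ofList_nil]
  | append_singleton ds c ih =>
    intro k
    rw [outIns_snoc, keys_insert_add, ih k, List.map_append, List.map_cons, List.map_nil,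
      PySem.Set.ofList_append_singleton]

theorem outIns_keys_nodup (l : List Char) (ds : List Char) (k : Nat) :
    (outIns l k PySem.Dict.empty ds).keys.Nodup := by
  rw [outIns_keys]; exact PySem.Set.nodup_ofList _

theorem lastIns_keys (ds : List Char) :
    ∀ (k : Int), (lastIns k PySem.Dict.empty ds).keys = PySem.Set.ofList (ds.map (fun c => String.ofList [c])) := by
  induction ds using List.reverseRecOn with
  | nil => intro k; simp [lastIns, PySem.Dict.keys_empty, PySem.Set.ofList_nil]
  | append_singleton ds c ih =>
    intro k
    rw [lastIns_snoc, keys_insert_add, ih k, List.map_append, List.map_cons, List.map_nil,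
      PySem.Set.ofList_append_singleton]

theorem lastIns_keys_nodup (ds : List Char) (k : Int) :
    (lastIns k PySem.Dict.empty ds).keys.Nodup := by
  rw [lastIns_keys]; exact PySem.Set.nodup_ofList _

theorem rowIns_getD (l : List Char) (ds : List Char) (c : Char) :
    ∀ (k : Nat) (dflt : String),
    (rowIns l k PySem.Dict.empty ds).getD (String.ofList [c]) dflt
    = match lastIdx ds c with
      | some j => String.ofList [l.getD ((k + j) % l.length) ' ']
      | none => dflt := by
  induction ds using List.reverseRecOn with
  | nil => intro k dflt; simp [rowIns, lastIdx, PySem.Dict.getD_empty]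
  | append_singleton ds c' ih =>
    intro k dflt
    rw [rowIns_snoc, PySem.Dict.getD_insert, lastIdx_snoc]
    by_cases h : c' = c
    · simp [h]
    · rw [if_neg h, if_neg (fun hh => h (((ofList_single_inj c' c).mp hh).symm))]
      exact ih k dflt

theorem outIns_getD (l : List Char) (ds : List Char) (c : Char) :
    ∀ (k : Nat) (dflt : PySem.Dict String String),
    (outIns l k PySem.Dict.empty ds).getD (String.ofList [c]) dflt
    = match lastIdx ds c with
      | some i => rowIns l (k + i * (l.length + 1)) PySem.Dict.empty l
      | none => dflt := by
  induction ds using List.reverseRecOn with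
  | nil => intro k dflt; simp [outIns, lastIdx, PySem.Dict.getD_empty]
  | append_singleton ds c' ih =>
    intro k dflt
    rw [outIns_snoc, PySem.Dict.getD_insert, lastIdx_snoc]
    by_cases h : c' = c
    · simp [h]
    · rw [if_neg h, if_neg (fun hh => h (((ofList_single_inj c' c).mp hh).symm))]
      exact ih k dflt

theorem lastIns_getD (ds : List Char) (c : Char) :
    ∀ (k : Int) (dflt : Int),
    (lastIns k PySem.Dict.empty ds).getD (String.ofList [c]) dflt
    = match lastIdx ds c with
      | some j => k + j
      | none => dflt := by
  induction ds using List.reverseRecOn with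
  | nil => intro k dflt; simp [lastIns, lastIdx, PySem.Dict.getD_empty]
  | append_singleton ds c' ih =>
    intro k dflt
    rw [lastIns_snoc, PySem.Dict.getD_insert, lastIdx_snoc]
    by_cases h : c' = c
    · simp [h]
    · rw [if_neg h, if_neg (fun hh => h (((ofList_single_inj c' c).mp hh).symm))]
      exact ih k dflt

theorem main_eq (digit_str : String) : make_sum_table digit_str = make_sum_table_alt digit_str := by
  rcases hl : digit_str.toList with _ | ⟨a, t⟩
  · simp [make_sum_table, make_sum_table_alt, hl, PySem.List.enumerate_nil, PySem.Dict.empty]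
  · have hne : digit_str.toList ≠ [] := by rw [hl]; simp
    set l := digit_str.toList with hldef
    have hn : 0 < l.length := List.length_pos_iff.mpr hne
    -- A side
    have hA : make_sum_table digit_str
        = (outIns l 0 PySem.Dict.empty l).items.map (fun p => (p.1, p.2.items)) := by
      unfold make_sum_table
      dsimp only
      rw [← hldef]
      have h0 : (l, (PySem.Dict.empty : PySem.Dict String (PySem.Dict String String)))
          = (l.rotate 0, PySem.Dict.empty) := by rw [List.rotate_zero]
      rw [h0, outerFold_eq l hne l 0 PySem.Dict.empty]
    -- B side
    have hB : make_sum_table_alt digit_str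
        = (lastIns 0 PySem.Dict.empty l).items.map (fun p1 =>
            (p1.1, (lastIns 0 PySem.Dict.empty l).items.map (fun p2 =>
              (p2.1, String.ofList [PySem.List.pyGetD l (PySem.Int.mod (p1.2 + p2.2) (l.length : Int)) ' '])))) := by
      unfold make_sum_table_alt
      dsimp only
      rw [← hldef, lastFold_eq l 0 PySem.Dict.empty]
    rw [hA, hB]
    have hK : (outIns l 0 PySem.Dict.empty l).keys
        = PySem.Set.ofList (l.map (fun c => String.ofList [c])) := outIns_keys l l 0
    have hKL : (lastIns 0 PySem.Dict.empty l).keys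
        = PySem.Set.ofList (l.map (fun c => String.ofList [c])) := lastIns_keys l 0
    rw [PySem.Dict.items_eq_map_keys _ (outIns_keys_nodup l l 0) PySem.Dict.empty,
        PySem.Dict.items_eq_map_keys _ (lastIns_keys_nodup l 0) 0, hK, hKL]
    rw [List.map_map, List.map_map]
    apply List.map_congr_left
    intro s1 hs1
    obtain ⟨c1, hc1mem, rfl⟩ := by
      simpa using (PySem.Set.mem_ofList _ _).mp hs1
    obtain ⟨i, hi⟩ := Option.isSome_iff_exists.mp (lastIdx_isSome l c1 hc1mem)
    simp only [Function.comp]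
    rw [outIns_getD l l c1 0 PySem.Dict.empty, lastIns_getD l c1 0 0, hi]
    simp only
    congr 1
    rw [PySem.Dict.items_eq_map_keys _ (rowIns_keys_nodup l l _) " ", rowIns_keys l l _]
    rw [List.map_map]
    apply List.map_congr_left
    intro s2 hs2
    obtain ⟨c2, hc2mem, rfl⟩ := by
      simpa using (PySem.Set.mem_ofList _ _).mp hs2
    obtain ⟨j, hj⟩ := Option.isSome_iff_exists.mp (lastIdx_isSome l c2 hc2mem)
    simp only [Function.comp]
    rw [rowIns_getD l l c2 _ " ", lastIns_getD l c2 0 0, hj]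
    simp only
    congr 2
    have hcast : (0 : Int) + (i : Int) + (0 + (j : Int)) = ((i + j : Nat) : Int) := by push_cast; ring
    rw [hcast, PySem.Int.mod_natCast, PySem.List.pyGetD_natCast]
    have harith : 0 + i * (l.length + 1) + j = (i + j) + i * l.length := by ring
    rw [harith, Nat.add_mul_mod_self_right]

-- ===== VERDICT (by name: the statement is the Claim_ definition above) =====
theorem make_sum_table_spec : Claim_equal_make_sum_table := by
  intro digit_str _
  unfold Spec_make_sum_table
  exact main_eq digit_str
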